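-- pv_equiv track=rewrite | github.com/aqdev-tech/tester-upload | flask_app (22).py | transform_database_data
-- ===== SOURCE A (Python) =====
-- def transform_database_data(data, transformations):
--     """n8n-style data transformation"""
--     if not isinstance(data, list):
--         return data
--
--     transformed_data = []
--     for item in data:
--         if isinstance(item, dict):
--             transformed_item = item.copy()
--
--             # Apply transformations
--             for field, transformation in transformations.items():
--                 if field in transformed_item:
--                     transformed_item[field] = apply_transformation(
--                         transformed_item[field],
--                         transformation
--                     )
--
--             transformed_data.append(transformed_item)
--
--     return transformed_data
--
-- def apply_transformation(value, transformation):
--     """Apply n8n-style transformations"""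
--     if transformation == 'uppercase':
--         return str(value).upper()
--     elif transformation == 'lowercase':
--         return str(value).lower()
--     elif transformation == 'trim':
--         return str(value).strip()
--     elif transformation.startswith('prefix:'):
--         prefix = transformation.split(':', 1)[1]
--         return f"{prefix}{value}"
--     elif transformation.startswith('suffix:'):
--         suffix = transformation.split(':', 1)[1]
--         return f"{value}{suffix}"
--     # Add more transformations as needed
--
--     return value
-- ===== SOURCE B (Python) =====
-- def transform_database_data(data, transformations):
--     """n8n-style data transformation (field-driven pass)"""
--     if not isinstance(data, list):
--         return data
--
--     return [
--         {k: (apply_transformation(v, transformations[k])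
--              if k in transformations else v)
--          for k, v in item.items()}
--         for item in data if isinstance(item, dict)
--     ]
--
-- def apply_transformation(value, transformation):
--     """Apply n8n-style transformations"""
--     if transformation == 'uppercase':
--         return str(value).upper()
--     elif transformation == 'lowercase':
--         return str(value).lower()
--     elif transformation == 'trim':
--         return str(value).strip()
--     elif transformation.startswith('prefix:'):
--         prefix = transformation.split(':', 1)[1]
--         return f"{prefix}{value}"
--     elif transformation.startswith('suffix:'):
--         suffix = transformation.split(':', 1)[1]
--         return f"{value}{suffix}"
--     return value
-- ===== Notes on version B (the rewrite author's own statement) =====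
-- stated objective: alternative
-- what changed: The inner loop now iterates over each record's own fields (a single dict comprehension) instead of scanning the transformations dict per record and mutating a copy in place; transformations is used only as a lookup table, so per-record cost is O(fields) lookups instead of O(transformations) membership tests and updates.
import Mathlib
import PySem

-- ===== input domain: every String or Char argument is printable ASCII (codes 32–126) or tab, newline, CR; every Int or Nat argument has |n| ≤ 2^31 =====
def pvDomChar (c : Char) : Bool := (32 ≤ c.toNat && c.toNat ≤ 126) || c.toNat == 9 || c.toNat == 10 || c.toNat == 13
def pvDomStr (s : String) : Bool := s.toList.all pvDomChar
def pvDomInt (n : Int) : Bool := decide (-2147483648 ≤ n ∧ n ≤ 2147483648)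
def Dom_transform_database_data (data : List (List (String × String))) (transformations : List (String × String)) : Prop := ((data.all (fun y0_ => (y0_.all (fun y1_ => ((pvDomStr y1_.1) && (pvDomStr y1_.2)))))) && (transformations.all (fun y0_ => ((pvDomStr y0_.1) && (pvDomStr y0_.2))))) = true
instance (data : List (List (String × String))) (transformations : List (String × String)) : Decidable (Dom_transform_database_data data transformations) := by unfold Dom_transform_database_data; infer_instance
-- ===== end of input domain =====

-- B replaces A's per-record scan over the transformations dict (mutating a copied dict in
-- place) by a single field-driven dict comprehension over the record itself, using
-- transformations only as a lookup table; same values, different traversal (objective: alternative).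

-- ===== PORT A =====
-- shared helper: apply_transformation is identical in Source A and Source B
def apply_transformation (value transformation : String) : String :=
  if transformation == "uppercase" then PySem.Str.upper value
  else if transformation == "lowercase" then PySem.Str.lower value
  else if transformation == "trim" then PySem.Str.strip value
  else if PySem.Str.startswith transformation "prefix:" then
    -- prefix = transformation.split(':', 1)[1]; return f"{prefix}{value}"
    PySem.Str.join "" [PySem.List.pyGetD ((PySem.Str.splitMax? transformation ":" 1).getD []) 1 "", value]
  else if PySem.Str.startswith transformation "suffix:" then
    PySem.Str.join "" [value, PySem.List.pyGetD ((PySem.Str.splitMax? transformation ":" 1).getD []) 1 ""]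
  else value

-- isinstance(data, list) / isinstance(item, dict) are always true under the declared types
def transform_database_data (data : List (List (String × String))) (transformations : List (String × String)) : List (List (String × String)) :=
  data.foldl (fun acc item =>
    let ti := transformations.foldl
      (fun (ti : PySem.Dict String String) ft =>
        if ti.contains ft.1 then
          ti.insert ft.1 (apply_transformation (ti.getD ft.1 "") ft.2)
        else ti)
      (PySem.Dict.mk item)   -- item.copy()
    acc ++ [ti.items]) []

-- ===== PORT B =====
def transform_database_data_alt (data : List (List (String × String))) (transformations : List (String × String)) : List (List (String × String)) :=
  let tdict := PySem.Dict.mk transformations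
  data.map (fun item =>
    item.map (fun kv =>
      match tdict.get? kv.1 with
      | some t => (kv.1, apply_transformation kv.2 t)
      | none => kv))

-- ===== PRECONDITION & SPEC =====
-- Pre_ excludes association lists with duplicate keys (in a record or in transformations):
-- they do not represent any Python dict, so A's behaviour on them is not defined by Source A.
def Pre_transform_database_data (data : List (List (String × String))) (transformations : List (String × String)) : Prop :=
  (∀ item ∈ data, (item.map Prod.fst).Nodup) ∧ (transformations.map Prod.fst).Nodup
instance (data : List (List (String × String))) (transformations : List (String × String)) : Decidable (Pre_transform_database_data data transformations) := by unfold Pre_transform_database_data; infer_instance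

def pvWitness_transform_database_data : (List (List (String × String))) × (List (String × String)) :=
  ([[("a", " hi "), ("b", "Yo")], [("b", "7")]], [("a", "trim"), ("b", "uppercase")])

def Spec_transform_database_data (data : List (List (String × String))) (transformations : List (String × String)) (out : List (List (String × String))) : Prop := out = transform_database_data_alt data transformations
instance (data : List (List (String × String))) (transformations : List (String × String)) (out : List (List (String × String))) : Decidable (Spec_transform_database_data data transformations out) := by unfold Spec_transform_database_data; infer_instance

-- ===== CLAIM (what is proved, stated in full; the proofs are below) =====
def Claim_equal_transform_database_data : Prop := ∀ (data : List (List (String × String))) (transformations : List (String × String)), Dom_transform_database_data data transformations → Pre_transform_database_data data transformations → Spec_transform_database_data data transformations (transform_database_data data transformations)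

-- ===== LEMMAS AND PROOFS =====

-- A's inner loop (over the transformations) applied to a dict with distinct keys produces,
-- item by item, exactly B's field-driven rewrite.
lemma tdd_fold_items (ts : List (String × String)) (d : PySem.Dict String String)
    (hd : d.keys.Nodup) (hts : (ts.map Prod.fst).Nodup) :
    (ts.foldl
      (fun (ti : PySem.Dict String String) ft =>
        if ti.contains ft.1 then
          ti.insert ft.1 (apply_transformation (ti.getD ft.1 "") ft.2)
        else ti) d).items
    = d.items.map (fun kv =>
        match (PySem.Dict.mk ts).get? kv.1 with
        | some t => (kv.1, apply_transformation kv.2 t)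
        | none => kv) := by
  induction ts generalizing d with
  | nil =>
    simp [PySem.Dict.get?]
  | cons ft rest ih =>
    obtain ⟨k, t⟩ := ft
    simp only [List.map_cons, List.nodup_cons] at hts
    obtain ⟨hk, hrest⟩ := hts
    simp only [List.foldl_cons]
    by_cases hc : d.contains k = true
    · rw [if_pos hc]
      have hkeys : (d.insert k (apply_transformation (d.getD k "") t)).keys = d.keys :=
        PySem.Dict.keys_insert_of_contains _ _ hc
      rw [ih _ (by rw [hkeys]; exact hd) hrest]
      rw [PySem.Dict.items_insert_of_contains _ _ hc, List.map_map]
      refine List.map_congr_left (fun p hp => ?_)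
      by_cases hpk : p.1 = k
      · have hpitems : (k, p.2) ∈ d.items := by
          rw [← hpk]; exact hp
        have hget : d.getD k "" = p.2 := PySem.Dict.getD_of_mem_items _ hpitems hd ""
        have hrget : (PySem.Dict.mk rest).get? k = none := by
          rw [PySem.Dict.get?_eq_none_iff_not_mem_keys]
          simpa using hk
        simp [Function.comp, hpk, PySem.Dict.get?_mk_cons, hrget, hget]
      · have hne : (p.1 == k) = false := by simp [hpk]
        simp [Function.comp, hne, PySem.Dict.get?_mk_cons, Ne.symm hpk]
    · rw [if_neg hc]
      rw [ih _ hd hrest]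
      refine List.map_congr_left (fun p hp => ?_)
      have hpk : p.1 ≠ k := by
        intro h
        apply hc
        rw [PySem.Dict.contains_iff_mem_keys, ← h]
        exact PySem.Dict.mem_keys_of_mem_items _ hp
      have hne : (k == p.1) = false := by simp [Ne.symm hpk]
      simp [PySem.Dict.get?_mk_cons, hne]

-- ===== VERDICT (by name: the statement is the Claim_ definition above) =====
theorem transform_database_data_spec : Claim_equal_transform_database_data := by
  intro data transformations _ hpre
  obtain ⟨hdata, hts⟩ := hpre
  unfold Spec_transform_database_data transform_database_data transform_database_data_alt
  rw [PySem.List.foldl_append_singleton_eq_map]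
  refine List.map_congr_left (fun item hitem => ?_)
  have hd : (PySem.Dict.mk item).keys.Nodup := by
    simpa [PySem.Dict.keys] using hdata item hitem
  simpa using tdd_fold_items transformations (PySem.Dict.mk item) hd hts
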